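-- pv_equiv track=rewrite | github.com/ghbsunny/pylearn | base_scirpt/word_count.py | makekey1
-- ===== SOURCE A (Python) =====
-- def makekey1(s:str):
--     chars = set(r"""!`"#./\()[],*-""")
--     key = s.lower()
--     ret = []
--     for i,c in enumerate(key):
--         if c in chars:
--             ret.append(' ')
--         else:
--             ret.append(c)
--     return ''.join(ret).split()
-- ===== SOURCE B (Python) =====
-- def makekey1(s: str):
--     punct = set(r"""!`"#./\()[],*-""")
--     words = []
--     buf = []
--     for c in s.lower():
--         if c in punct or c.isspace():
--             if buf:
--                 words.append(''.join(buf))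
--                 buf = []
--         else:
--             buf.append(c)
--     if buf:
--         words.append(''.join(buf))
--     return words
-- ===== Notes on version B (the rewrite author's own statement) =====
-- stated objective: alternative
-- what changed: B collects words directly in one pass with a current-word buffer (delimiter = punctuation set or whitespace), instead of A's pipeline of building a character list, joining it into a new string and calling split().
import Mathlib
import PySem

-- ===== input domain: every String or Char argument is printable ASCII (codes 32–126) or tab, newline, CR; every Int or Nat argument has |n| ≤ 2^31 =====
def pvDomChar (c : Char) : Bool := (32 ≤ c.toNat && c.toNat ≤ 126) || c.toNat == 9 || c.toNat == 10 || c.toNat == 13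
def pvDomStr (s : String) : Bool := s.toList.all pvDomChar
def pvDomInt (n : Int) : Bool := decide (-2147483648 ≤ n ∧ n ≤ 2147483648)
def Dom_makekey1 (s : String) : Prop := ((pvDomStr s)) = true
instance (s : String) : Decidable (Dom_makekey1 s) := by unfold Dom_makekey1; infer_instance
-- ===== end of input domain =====

-- B collects the words in one pass with a current-word buffer instead of A's replace-join-split pipeline.


-- ===== PORT A =====
-- chars = set(r"""!`"#./\()[],*-""")
def makekey1Chars : PySem.Set Char :=
  PySem.Set.ofList ['!', '`', '"', '#', '.', '/', '\\', '(', ')', '[', ']', ',', '*', '-']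

def makekey1 (s : String) : List String :=
  let chars := makekey1Chars
  let key := PySem.Str.lower s
  let ret : List Char :=
    (PySem.List.enumerate key.toList).foldl
      (fun ret ic => if chars.contains ic.2 then ret ++ [' '] else ret ++ [ic.2]) []
  PySem.Str.split₀ (String.ofList ret)

-- ===== PORT B =====
def makekey1AltPunct : List Char :=
  ['!', '`', '"', '#', '.', '/', '\\', '(', ')', '[', ']', ',', '*', '-']

-- the loop of Source B: buf is the current word, words the output so far
def makekey1AltGo : List Char → List Char → List String → List String
  | [], buf, words => if buf.isEmpty then words else words ++ [String.ofList buf]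
  | c :: rest, buf, words =>
    if (PySem.Set.ofList makekey1AltPunct).contains c || PySem.Chars.isspace c then
      if buf.isEmpty then makekey1AltGo rest buf words
      else makekey1AltGo rest [] (words ++ [String.ofList buf])
    else makekey1AltGo rest (buf ++ [c]) words

def makekey1_alt (s : String) : List String :=
  makekey1AltGo (PySem.Str.lower s).toList [] []

-- ===== PRECONDITION & SPEC =====
def Spec_makekey1 (s : String) (out : List String) : Prop := out = makekey1_alt s
instance (s : String) (out : List String) : Decidable (Spec_makekey1 s out) := by unfold Spec_makekey1; infer_instance

-- ===== CLAIM (what is proved, stated in full; the proofs are below) =====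
def Claim_equal_makekey1 : Prop := ∀ (s : String), Dom_makekey1 s → Spec_makekey1 s (makekey1 s)

-- ===== LEMMAS AND PROOFS =====

-- A's replacement of a single character
def pvRepl (c : Char) : Char := if makekey1Chars.contains c then ' ' else c

lemma pvSetEq : PySem.Set.ofList makekey1AltPunct = makekey1Chars := rfl

lemma pvContains_iff (c : Char) : makekey1Chars.contains c = true ↔ c ∈ makekey1AltPunct := by
  simp [makekey1Chars, makekey1AltPunct, PySem.Set.contains, PySem.Set.ofList]

lemma pvRepl_delim (c : Char) (hd : c ∈ makekey1AltPunct ∨ PySem.Chars.isspace c = true) :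
    PySem.Chars.isspace (pvRepl c) = true := by
  unfold pvRepl
  by_cases hc : makekey1Chars.contains c = true
  · rw [if_pos hc]; decide
  · rw [if_neg hc]
    rcases hd with h | h
    · exact absurd ((pvContains_iff c).mpr h) hc
    · exact h

lemma pvRepl_not_delim (c : Char) (hd : ¬(c ∈ makekey1AltPunct ∨ PySem.Chars.isspace c = true)) :
    pvRepl c = c ∧ PySem.Chars.isspace c = false := by
  push Not at hd
  obtain ⟨h1, h2⟩ := hd
  have hc : makekey1Chars.contains c = false :=
    Bool.eq_false_iff.mpr (fun h => h1 ((pvContains_iff c).mp h))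
  refine ⟨?_, Bool.eq_false_iff.mpr h2⟩
  unfold pvRepl; rw [hc]; simp

-- A's foldl over enumerate builds the pointwise replacement
lemma pvFoldl_enumerate (cs : List Char) : ∀ (k : Int) (acc : List Char),
    (PySem.List.enumerate cs k).foldl
      (fun ret ic => if makekey1Chars.contains ic.2 then ret ++ [' '] else ret ++ [ic.2]) acc
      = acc ++ cs.map pvRepl := by
  induction cs with
  | nil => intro k acc; rw [PySem.List.enumerate_nil]; simp
  | cons c rest ih =>
    intro k acc
    rw [PySem.List.enumerate_cons, List.foldl_cons, ih]
    simp only [List.map_cons]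
    by_cases h : makekey1Chars.contains c = true
    · simp only [h, if_true, pvRepl]; simp
    · have h' : makekey1Chars.contains c = false := Bool.eq_false_iff.mpr h
      simp only [h', pvRepl, Bool.false_eq_true, if_false]; simp

-- split₀ of the replaced string is B's one-pass scan
lemma pvGo_eq (cs : List Char) : ∀ (buf : List Char) (acc : List (List Char)),
    (PySem.Chars.split₀.go (cs.map pvRepl) buf.reverse acc).map String.ofList
      = makekey1AltGo cs buf (acc.reverse.map String.ofList) := by
  induction cs with
  | nil =>
    intro buf acc
    simp only [List.map_nil, PySem.Chars.split₀.go, makekey1AltGo]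
    by_cases hb : buf = []
    · subst hb; simp
    · have h1 : buf.reverse.isEmpty = false := by simp [hb]
      have h2 : buf.isEmpty = false := by simp [hb]
      simp [h1, h2]
  | cons c rest ih =>
    intro buf acc
    simp only [List.map_cons, PySem.Chars.split₀.go, makekey1AltGo, pvSetEq]
    by_cases hd : c ∈ makekey1AltPunct ∨ PySem.Chars.isspace c = true
    · have hs : PySem.Chars.isspace (pvRepl c) = true := pvRepl_delim c hd
      have hcond : (makekey1Chars.contains c || PySem.Chars.isspace c) = true := by
        rcases hd with h | h
        · rw [(pvContains_iff c).mpr h]; simp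
        · rw [h]; simp
      simp only [hs, hcond, if_true]
      by_cases hb : buf = []
      · subst hb
        simp only [List.reverse_nil, List.isEmpty_nil, if_true]
        simpa using ih [] acc
      · have h1 : buf.reverse.isEmpty = false := by simp [hb]
        have h2 : buf.isEmpty = false := by simp [hb]
        rw [h1, h2]
        simp only [Bool.false_eq_true, if_false, List.reverse_reverse]
        have := ih [] (buf :: acc)
        simp only [List.reverse_nil, List.reverse_cons, List.map_append, List.map_cons,
          List.map_nil] at this
        simpa using this
    · obtain ⟨hrc, hnc⟩ := pvRepl_not_delim c hd
      have hs : PySem.Chars.isspace (pvRepl c) = false := by rw [hrc]; exact hnc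
      have hcond : (makekey1Chars.contains c || PySem.Chars.isspace c) = false := by
        have hc : makekey1Chars.contains c = false :=
          Bool.eq_false_iff.mpr (fun h0 => hd (Or.inl ((pvContains_iff c).mp h0)))
        rw [hc, hnc]; simp
      simp only [hs, hcond, Bool.false_eq_true, if_false]
      rw [hrc]
      have := ih (buf ++ [c]) acc
      simpa [List.reverse_append] using this

-- ===== VERDICT (by name: the statement is the Claim_ definition above) =====
theorem makekey1_spec : Claim_equal_makekey1 := by
  intro s _
  show makekey1 s = makekey1_alt s
  unfold makekey1 makekey1_alt
  simp only [pvFoldl_enumerate, List.nil_append, PySem.Str.split₀, PySem.Chars.split₀]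
  have h := pvGo_eq (PySem.Str.lower s).toList [] []
  simpa using h
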